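-- pv_equiv track=rewrite | github.com/baixian-white/SpeechTokenizer | demo_nature/多人嘈杂环境/example.py | layers_tag
-- ===== SOURCE A (Python) =====
-- def layers_tag(layers: list[int]) -> str:
--     """把层列表压缩为 tag，用于文件名（例如 [0,1,2,5] -> '0-2_5'）。"""
--     if not layers:
--         return "none"
--     runs = []
--     start = prev = layers[0]
--     for x in layers[1:]:
--         if x == prev + 1:
--             prev = x
--         else:
--             runs.append((start, prev))
--             start = prev = x
--     runs.append((start, prev))
--     parts = [f"{a}-{b}" if a != b else f"{a}" for (a, b) in runs]
--     return "_".join(parts)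
-- ===== SOURCE B (Python) =====
-- from itertools import groupby
--
-- def layers_tag(layers: list[int]) -> str:
--     """把层列表压缩为 tag，用于文件名（例如 [0,1,2,5] -> '0-2_5'）。
--
--     Idiomatic decomposition: enumerate the list and group by the derived key
--     value - index; each group is exactly a maximal run of consecutive integers,
--     read off by its first and last value.
--     """
--     if not layers:
--         return "none"
--     parts = []
--     for _, grp in groupby(enumerate(layers), key=lambda p: p[1] - p[0]):
--         vals = [v for _, v in grp]
--         a, b = vals[0], vals[-1]
--         parts.append(f"{a}-{b}" if a != b else f"{a}")
--     return "_".join(parts)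
-- ===== Notes on version B (the rewrite author's own statement) =====
-- stated objective: idiomatic
-- what changed: Replaces the explicit start/prev run-tracking loop with itertools.groupby over enumerate(layers) keyed by value-index, reading each maximal consecutive run off its group's first and last value.
import Mathlib
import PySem

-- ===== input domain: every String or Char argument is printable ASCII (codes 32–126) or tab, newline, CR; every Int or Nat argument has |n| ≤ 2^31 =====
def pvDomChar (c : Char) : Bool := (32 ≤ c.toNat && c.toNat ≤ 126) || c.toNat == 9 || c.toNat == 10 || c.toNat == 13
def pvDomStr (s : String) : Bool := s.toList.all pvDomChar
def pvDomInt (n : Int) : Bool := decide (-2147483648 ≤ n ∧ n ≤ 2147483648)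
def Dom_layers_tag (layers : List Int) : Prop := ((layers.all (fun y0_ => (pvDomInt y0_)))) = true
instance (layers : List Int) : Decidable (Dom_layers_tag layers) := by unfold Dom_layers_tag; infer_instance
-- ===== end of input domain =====

-- B replaces A's explicit start/prev run-tracking loop with a groupby-style decomposition:
-- enumerate the list, group adjacent elements by the derived key value - index, and read
-- each maximal consecutive run off its group's first and last value; same cost.


-- ===== PORT A =====
-- loop body of A: state = (runs, start, prev)
def pvStepA (s : List (Int × Int) × Int × Int) (x : Int) : List (Int × Int) × Int × Int :=
  if x = s.2.2 + 1 then (s.1, s.2.1, x) else (s.1 ++ [(s.2.1, s.2.2)], x, x)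

def pvPart (p : Int × Int) : String :=
  if p.1 ≠ p.2 then PySem.Int.toStr p.1 ++ "-" ++ PySem.Int.toStr p.2 else PySem.Int.toStr p.1

def layers_tag (layers : List Int) : String :=
  match layers with
  | [] => "none"
  | h :: t =>
    let st := t.foldl pvStepA ([], h, h)
    let runs := st.1 ++ [(st.2.1, st.2.2)]
    PySem.Str.join "_" (runs.map pvPart)

-- ===== PORT B =====
-- enumerate(layers) starting at index i
def pvEnum (i : Int) : List Int → List (Int × Int)
  | [] => []
  | x :: xs => (i, x) :: pvEnum (i + 1) xs

-- itertools.groupby with key p.2 - p.1: split into maximal adjacent groups of equal key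
def pvGroups : List (Int × Int) → List (List (Int × Int))
  | [] => []
  | [x] => [[x]]
  | x :: y :: rest =>
    match pvGroups (y :: rest) with
    | [] => [[x]]
    | g :: gs => if x.2 - x.1 = y.2 - y.1 then (x :: g) :: gs else [x] :: g :: gs

-- one group -> its part string, from the group's first and last value
def pvGroupPart (g : List (Int × Int)) : String :=
  let vals := g.map Prod.snd
  let a := vals.headD 0
  let b := vals.getLastD 0
  if a ≠ b then PySem.Int.toStr a ++ "-" ++ PySem.Int.toStr b else PySem.Int.toStr a

def layers_tag_alt (layers : List Int) : String :=
  if layers = [] then "none"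
  else PySem.Str.join "_" ((pvGroups (pvEnum 0 layers)).map pvGroupPart)

-- ===== PRECONDITION & SPEC =====
def Spec_layers_tag (layers : List Int) (out : String) : Prop := out = layers_tag_alt layers
instance (layers : List Int) (out : String) : Decidable (Spec_layers_tag layers out) := by unfold Spec_layers_tag; infer_instance

-- ===== CLAIM (what is proved, stated in full; the proofs are below) =====
def Claim_equal_layers_tag : Prop := ∀ (layers : List Int), Dom_layers_tag layers → Spec_layers_tag layers (layers_tag layers)

-- ===== LEMMAS AND PROOFS =====

-- canonical run decomposition of (start, prev, rest)
def pvRuns (s p : Int) : List Int → List (Int × Int)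
  | [] => [(s, p)]
  | x :: xs => if x = p + 1 then pvRuns s x xs else (s, p) :: pvRuns x x xs

def pvPairOf (g : List (Int × Int)) : Int × Int :=
  ((g.map Prod.snd).headD 0, (g.map Prod.snd).getLastD 0)

theorem pvRuns_shape (xs : List Int) (p : Int) :
    ∃ b r, ∀ s, pvRuns s p xs = (s, b) :: r := by
  induction xs generalizing p with
  | nil => exact ⟨p, [], fun s => rfl⟩
  | cons x xs ih =>
    by_cases h : x = p + 1
    · obtain ⟨b, r, hb⟩ := ih x
      exact ⟨b, r, fun s => by simp only [pvRuns, if_pos h]; exact hb s⟩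
    · exact ⟨p, pvRuns x x xs, fun s => by simp [pvRuns, h]⟩

theorem pvFoldA (t : List Int) (acc : List (Int × Int)) (s p : Int) :
    (t.foldl pvStepA (acc, s, p)).1 ++ [((t.foldl pvStepA (acc, s, p)).2.1, (t.foldl pvStepA (acc, s, p)).2.2)]
      = acc ++ pvRuns s p t := by
  induction t generalizing acc s p with
  | nil => simp [pvRuns]
  | cons x xs ih =>
    by_cases h : x = p + 1
    · simp [List.foldl_cons, pvStepA, h, ih, pvRuns]
    · simp [List.foldl_cons, pvStepA, h, ih, pvRuns]

theorem pvGroups_cons (p : Int × Int) (l : List (Int × Int)) :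
    ∃ g' gs, pvGroups (p :: l) = (p :: g') :: gs := by
  match l with
  | [] => exact ⟨[], [], rfl⟩
  | y :: rest =>
    obtain ⟨g', gs, hg⟩ := pvGroups_cons y rest
    by_cases h : p.2 - p.1 = y.2 - y.1
    · exact ⟨y :: g', gs, by simp only [pvGroups, hg, if_pos h]⟩
    · exact ⟨[], (y :: g') :: gs, by simp only [pvGroups, hg, if_neg h]⟩

theorem pvGroups_runs (t : List Int) (i h : Int) :
    (pvGroups (pvEnum i (h :: t))).map pvPairOf = pvRuns h h t := by
  induction t generalizing i h with
  | nil => simp [pvEnum, pvGroups, pvPairOf, pvRuns]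
  | cons x xs ih =>
    obtain ⟨g', gs, hg⟩ := pvGroups_cons (i + 1, x) (pvEnum (i + 1 + 1) xs)
    have hih := ih (i + 1) x
    simp only [pvEnum] at hih
    rw [hg] at hih
    obtain ⟨b, r, hb⟩ := pvRuns_shape xs x
    rw [hb x] at hih
    simp only [List.map_cons] at hih
    have hhead : pvPairOf ((i + 1, x) :: g') = (x, b) := (List.cons.injEq _ _ _ _ ▸ hih).1
    have htail : gs.map pvPairOf = r := (List.cons.injEq _ _ _ _ ▸ hih).2
    have hlast : ((x :: g'.map Prod.snd).getLastD 0) = b := by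
      have := congrArg Prod.snd hhead
      simpa [pvPairOf] using this
    by_cases hc : x = h + 1
    · have hk : (h : Int) - i = x - (i + 1) := by omega
      simp only [pvEnum, pvGroups, hg, if_pos hk]
      simp only [List.map_cons]
      have : pvPairOf ((i, h) :: (i + 1, x) :: g') = (h, b) := by
        simp only [pvPairOf, List.map_cons, List.headD_cons]
        simp only [List.getLastD_cons] at hlast ⊢
        exact congrArg _ hlast
      rw [this, htail]
      simp only [pvRuns, if_pos hc]
      exact (hb h).symm
    · have hk : ¬ ((h : Int) - i = x - (i + 1)) := by omega
      simp only [pvEnum, pvGroups, hg, if_neg hk]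
      simp only [List.map_cons]
      have : pvPairOf [(i, h)] = (h, h) := by simp [pvPairOf]
      rw [this, hhead, htail]
      simp only [pvRuns, if_neg hc]
      rw [hb x]

theorem pvGroupPart_eq (g : List (Int × Int)) : pvGroupPart g = pvPart (pvPairOf g) := rfl

-- ===== VERDICT (by name: the statement is the Claim_ definition above) =====
theorem layers_tag_spec : Claim_equal_layers_tag := by
  intro layers _
  unfold Spec_layers_tag
  match layers with
  | [] => rfl
  | h :: t =>
    simp only [layers_tag, layers_tag_alt, if_neg (List.cons_ne_nil h t)]
    rw [pvFoldA t [] h h, List.nil_append]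
    have : (pvGroups (pvEnum 0 (h :: t))).map pvGroupPart
        = ((pvGroups (pvEnum 0 (h :: t))).map pvPairOf).map pvPart := by
      simp [List.map_map, Function.comp, pvGroupPart_eq]
    rw [this, pvGroups_runs]
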